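-- pv_equiv track=rewrite | github.com/gui-bertoso/maya | core/process.py | extract_browser_clause
-- ===== SOURCE A (Python) =====
-- def extract_browser_clause(text):
--     known_browser_aliases = {
--         "firefox",
--         "chrome",
--         "edge",
--         "opera",
--         "brave",
--         "browser",
--         "internet browser",
--     }
--     stripped = text.strip()
--     lowered = stripped.lower()
--
--     for browser_alias in sorted(known_browser_aliases, key=len, reverse=True):
--         for connector in (" using ", " in ", " on ", " no ", " na ", " em "):
--             suffix = f"{connector}{browser_alias}"
--             if lowered.endswith(suffix):
--                 return stripped[: -len(suffix)].strip(), browser_alias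
--
--     return stripped, None
-- ===== SOURCE B (Python) =====
-- _ALIASES = ("firefox", "chrome", "edge", "opera", "brave", "browser", "internet browser")
-- _CONNECTORS = ("using", "in", "on", "no", "na", "em")
--
-- _SUFFIX_MAP = {}
-- for _a in _ALIASES:
--     for _c in _CONNECTORS:
--         _SUFFIX_MAP[" " + _c + " " + _a] = _a
--
-- # the distinct suffix lengths, longest first
-- _LENGTHS = tuple(sorted({len(s) for s in _SUFFIX_MAP}, reverse=True))
--
--
-- def extract_browser_clause(text):
--     stripped = text.strip()
--     lowered = stripped.lower()
--     n = len(lowered)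
--     for k in _LENGTHS:
--         if k <= n:
--             alias = _SUFFIX_MAP.get(lowered[n - k:])
--             if alias is not None:
--                 return stripped[: n - k].strip(), alias
--     return stripped, None
-- ===== Notes on version B (the rewrite author's own statement) =====
-- stated objective: alternative
-- what changed: Replaces the nested alias-by-connector endswith scan (up to 42 suffix scans of the string) with a hash map from all connector+alias suffixes built once at module load, probed with the 9 distinct tail lengths longest-first; correct because at most one suffix can ever match.
import Mathlib
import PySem

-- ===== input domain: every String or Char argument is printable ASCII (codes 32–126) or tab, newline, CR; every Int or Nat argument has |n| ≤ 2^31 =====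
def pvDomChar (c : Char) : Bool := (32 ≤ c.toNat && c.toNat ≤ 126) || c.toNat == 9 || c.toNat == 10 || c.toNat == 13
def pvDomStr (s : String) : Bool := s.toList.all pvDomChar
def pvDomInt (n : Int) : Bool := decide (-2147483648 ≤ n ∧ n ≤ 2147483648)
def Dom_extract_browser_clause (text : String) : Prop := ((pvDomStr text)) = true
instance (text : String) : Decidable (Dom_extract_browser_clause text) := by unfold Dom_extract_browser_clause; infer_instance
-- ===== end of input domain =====

-- B replaces A's nested alias×connector endswith scan by a map from all connector+alias
-- suffixes built once, probed with the 9 distinct suffix lengths longest-first (alternative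
-- decomposition; exact because at most one suffix can match a given string).

-- ===== PORT A =====
def ebcConnectors : List (List Char) :=
  [" using ".toList, " in ".toList, " on ".toList, " no ".toList, " na ".toList, " em ".toList]

def ebcTryConn (stripped lowered : List Char) (al : String) : List (List Char) → Option (String × Option String)
  | [] => none
  | c :: cs =>
    let suffix := c ++ al.toList
    if PySem.Chars.endswith lowered suffix then
      some (String.ofList (PySem.Chars.strip (PySem.List.slice stripped none (some (-(suffix.length : Int))))), some al)
    else ebcTryConn stripped lowered al cs

def ebcTryAliases (stripped lowered : List Char) : List String → Option (String × Option String)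
  | [] => none
  | a :: as =>
    match ebcTryConn stripped lowered a ebcConnectors with
    | some r => some r
    | none => ebcTryAliases stripped lowered as

def extract_browser_clause (text : String) : String × Option String :=
  let knownAliases : PySem.Set String :=
    PySem.Set.ofList ["firefox", "chrome", "edge", "opera", "brave", "browser", "internet browser"]
  let stripped := PySem.Chars.strip text.toList
  let lowered := PySem.Chars.lower stripped
  match ebcTryAliases stripped lowered (PySem.List.sorted knownAliases (fun s => PySem.Str.len s) true) with
  | some r => r
  | none => (String.ofList stripped, none)

-- ===== PORT B =====
-- module-level table of Source B: {" conn alias": alias}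
def ebcSuffixMap : PySem.Dict (List Char) String :=
  (["firefox", "chrome", "edge", "opera", "brave", "browser", "internet browser"]).foldl
    (fun d a => (["using", "in", "on", "no", "na", "em"]).foldl
      (fun d c => PySem.Dict.insert d ((' ' :: c.toList) ++ (' ' :: a.toList)) a) d)
    PySem.Dict.empty

-- module-level _LENGTHS of Source B: sorted({len(s) for s in _SUFFIX_MAP}, reverse=True)
def ebcLengths : List Nat :=
  PySem.List.sorted (PySem.Set.ofList (ebcSuffixMap.keys.map List.length)) (fun k => k) true

def ebcProbe (stripped lowered : List Char) (n : Nat) : List Nat → String × Option String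
  | [] => (String.ofList stripped, none)
  | k :: ks =>
    if k ≤ n then
      match PySem.Dict.get? ebcSuffixMap (PySem.List.slice lowered (some ((n - k : Nat) : Int)) none) with
      | some al => (String.ofList (PySem.Chars.strip (PySem.List.slice stripped none (some ((n - k : Nat) : Int)))), some al)
      | none => ebcProbe stripped lowered n ks
    else ebcProbe stripped lowered n ks

def extract_browser_clause_alt (text : String) : String × Option String :=
  let stripped := PySem.Chars.strip text.toList
  let lowered := PySem.Chars.lower stripped
  ebcProbe stripped lowered lowered.length ebcLengths

-- ===== PRECONDITION & SPEC =====
def Spec_extract_browser_clause (text : String) (out : String × Option String) : Prop := out = extract_browser_clause_alt text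
instance (text : String) (out : String × Option String) : Decidable (Spec_extract_browser_clause text out) := by unfold Spec_extract_browser_clause; infer_instance

-- ===== CLAIM (what is proved, stated in full; the proofs are below) =====
def Claim_equal_extract_browser_clause : Prop := ∀ (text : String), Dom_extract_browser_clause text → Spec_extract_browser_clause text (extract_browser_clause text)

-- ===== LEMMAS AND PROOFS =====

-- the 42 (suffix, alias) pairs, in A's (length-sorted alias)-major order
def ebcPairs : List (List Char × String) :=
  (["internet browser", "firefox", "browser", "chrome", "opera", "brave", "edge"]).flatMap
    (fun a => ebcConnectors.map (fun c => (c ++ a.toList, a)))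

lemma ebc_sorted_eq :
    PySem.List.sorted (PySem.Set.ofList ["firefox", "chrome", "edge", "opera", "brave", "browser", "internet browser"])
      (fun s => PySem.Str.len s) true
    = ["internet browser", "firefox", "browser", "chrome", "opera", "brave", "edge"] := by decide

set_option maxRecDepth 10000 in
lemma ebc_lengths_eq : ebcLengths = [23, 20, 14, 13, 12, 11, 10, 9, 8] := by decide

lemma ebc_fact_len : ∀ p ∈ ebcPairs, p.1.length ∈ ebcLengths := by rw [ebc_lengths_eq]; decide

lemma ebc_fact_pos : ∀ p ∈ ebcPairs, 0 < p.1.length := by decide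

set_option maxRecDepth 10000 in
lemma ebc_fact_nosuffix : ∀ p ∈ ebcPairs, ∀ q ∈ ebcPairs, p.1.length < q.1.length → ¬ p.1 <:+ q.1 := by decide

set_option maxRecDepth 10000 in
lemma ebc_keyinj : ∀ p ∈ ebcPairs, ∀ q ∈ ebcPairs, p.1 = q.1 → p = q := by decide

set_option maxRecDepth 10000 in
lemma ebc_fact_get : ∀ p ∈ ebcPairs, PySem.Dict.get? ebcSuffixMap p.1 = some p.2 := by decide

lemma ebc_get?_mem {κ ν : Type} [BEq κ] [LawfulBEq κ] (d : PySem.Dict κ ν) (x : κ) (a : ν)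
    (h : d.get? x = some a) : (x, a) ∈ d.items := by
  obtain ⟨l⟩ := d
  induction l with
  | nil => simp [PySem.Dict.get?] at h
  | cons p r ih =>
    obtain ⟨k, v⟩ := p
    rw [PySem.Dict.get?_mk_cons] at h
    by_cases hk : (k == x) = true
    · simp [hk] at h
      simp [eq_of_beq hk, ← h]
    · simp [hk] at h
      exact List.mem_cons_of_mem _ (ih h)

set_option maxRecDepth 10000 in
lemma ebc_fact_items : ∀ pr ∈ ebcSuffixMap.items, pr ∈ ebcPairs := by decide

-- any key of the map matching as a tail of l is one of the 42 pairs and a suffix of l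
lemma ebc_probe_pair {l : List Char} {n k : Nat} {a : String} (hn : n = l.length) (hk : k ≤ n)
    (h : PySem.Dict.get? ebcSuffixMap (l.drop (n - k)) = some a) :
    (l.drop (n - k), a) ∈ ebcPairs ∧ (l.drop (n - k)) <:+ l ∧ (l.drop (n - k)).length = k := by
  refine ⟨ebc_fact_items _ (ebc_get?_mem _ _ _ h), List.drop_suffix _ _, ?_⟩
  simp [hn]; omega

lemma ebc_unique {l : List Char} {p q : List Char × String} (hp : p ∈ ebcPairs) (hq : q ∈ ebcPairs)
    (hpl : p.1 <:+ l) (hql : q.1 <:+ l) : p = q := by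
  rcases lt_trichotomy p.1.length q.1.length with h | h | h
  · exact absurd (List.suffix_of_suffix_length_le hpl hql h.le) (ebc_fact_nosuffix p hp q hq h)
  · exact ebc_keyinj p hp q hq
      (List.IsSuffix.eq_of_length (List.suffix_of_suffix_length_le hpl hql h.le) h)
  · exact False.elim (ebc_fact_nosuffix q hq p hp h (List.suffix_of_suffix_length_le hql hpl h.le))

lemma ebc_tryConn_eq (s l : List Char) (a : String) (cs : List (List Char)) :
    ebcTryConn s l a cs =
      ((cs.map (fun c => (c ++ a.toList, a))).find? (fun p => PySem.Chars.endswith l p.1)).map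
        (fun p => (String.ofList (PySem.Chars.strip (PySem.List.slice s none (some (-(p.1.length : Int))))), some p.2)) := by
  induction cs with
  | nil => simp [ebcTryConn]
  | cons c cs ih =>
    simp only [ebcTryConn, List.map_cons, List.find?_cons]
    by_cases h : PySem.Chars.endswith l (c ++ a.toList)
    · simp [h]
    · simp [h, ih]

lemma ebc_tryAliases_eq (s l : List Char) (as : List String) :
    ebcTryAliases s l as =
      ((as.flatMap (fun a => ebcConnectors.map (fun c => (c ++ a.toList, a)))).find?
          (fun p => PySem.Chars.endswith l p.1)).map
        (fun p => (String.ofList (PySem.Chars.strip (PySem.List.slice s none (some (-(p.1.length : Int))))), some p.2)) := by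
  induction as with
  | nil => simp [ebcTryAliases]
  | cons a as ih =>
    simp only [ebcTryAliases, List.flatMap_cons, List.find?_append, ebc_tryConn_eq s l a]
    cases hf : (ebcConnectors.map (fun c => (c ++ a.toList, a))).find? (fun p => PySem.Chars.endswith l p.1) with
    | some p => simp
    | none => simp [ih]

set_option maxRecDepth 100000 in
lemma ebcProbe_cons (s l : List Char) (n k : Nat) (ks : List Nat) :
    ebcProbe s l n (k :: ks) = if k ≤ n then
      match PySem.Dict.get? ebcSuffixMap (PySem.List.slice l (some ((n - k : Nat) : Int)) none) with
      | some al => (String.ofList (PySem.Chars.strip (PySem.List.slice s none (some ((n - k : Nat) : Int)))), some al)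
      | none => ebcProbe s l n ks
    else ebcProbe s l n ks := rfl

lemma ebc_probe_none (s l : List Char) (n : Nat) (ks : List Nat)
    (h : ∀ k ∈ ks, k ≤ n → PySem.Dict.get? ebcSuffixMap (l.drop (n - k)) = none) :
    ebcProbe s l n ks = (String.ofList s, none) := by
  induction ks with
  | nil => rfl
  | cons k ks ih =>
    rw [ebcProbe_cons]
    by_cases hk : k ≤ n
    · rw [if_pos hk, PySem.List.slice_from_natCast, h k (by simp) hk]
      exact ih fun k' hk' => h k' (by simp [hk'])
    · rw [if_neg hk]
      exact ih fun k' hk' => h k' (by simp [hk'])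

lemma ebc_probe_found (s l : List Char) (n : Nat) (ks : List Nat) (k₀ : Nat) (a : String)
    (hmem : k₀ ∈ ks) (hk : k₀ ≤ n)
    (hsome : PySem.Dict.get? ebcSuffixMap (l.drop (n - k₀)) = some a)
    (hother : ∀ k ∈ ks, k ≠ k₀ → k ≤ n → PySem.Dict.get? ebcSuffixMap (l.drop (n - k)) = none) :
    ebcProbe s l n ks = (String.ofList (PySem.Chars.strip (s.take (n - k₀))), some a) := by
  induction ks with
  | nil => cases hmem
  | cons k ks ih =>
    rw [ebcProbe_cons]
    by_cases hkeq : k = k₀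
    · subst hkeq
      rw [if_pos hk, PySem.List.slice_from_natCast, hsome, PySem.List.slice_to_natCast]
    · have hrec := ih ((List.mem_cons.mp hmem).resolve_left fun h => hkeq h.symm)
        (fun k' hk' hne => hother k' (by simp [hk']) hne)
      by_cases hkn : k ≤ n
      · rw [if_pos hkn, PySem.List.slice_from_natCast, hother k (by simp) hkeq hkn]
        exact hrec
      · rw [if_neg hkn]; exact hrec

lemma ebc_main (s : List Char) :
    (match ebcTryAliases s (PySem.Chars.lower s)
        (PySem.List.sorted (PySem.Set.ofList ["firefox", "chrome", "edge", "opera", "brave", "browser", "internet browser"])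
          (fun s => PySem.Str.len s) true) with
      | some r => r
      | none => (String.ofList s, none)) =
    ebcProbe s (PySem.Chars.lower s) (PySem.Chars.lower s).length ebcLengths := by
  set l := PySem.Chars.lower s with hl
  have hlen : l.length = s.length := by rw [hl]; simp [PySem.Chars.lower]
  rw [ebc_sorted_eq, ebc_tryAliases_eq]
  have hpairs : (["internet browser", "firefox", "browser", "chrome", "opera", "brave", "edge"]).flatMap
      (fun a => ebcConnectors.map (fun c => (c ++ a.toList, a))) = ebcPairs := rfl
  rw [hpairs]
  cases hf : ebcPairs.find? (fun p => PySem.Chars.endswith l p.1) with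
  | none =>
    have hnone : ∀ p ∈ ebcPairs, ¬ p.1 <:+ l := by
      intro p hp hsuf
      exact absurd ((PySem.Chars.endswith_iff l p.1).mpr hsuf) (by
        have := List.find?_eq_none.mp hf p hp; simpa using this)
    rw [ebc_probe_none s l l.length ebcLengths (fun k hk hkn => ?_)]
    · rfl
    · cases hg : PySem.Dict.get? ebcSuffixMap (l.drop (l.length - k)) with
      | none => rfl
      | some a =>
        obtain ⟨hmem, hsuf, _⟩ := ebc_probe_pair rfl hkn hg
        exact absurd hsuf (hnone _ hmem)
  | some p =>
    have hp : p ∈ ebcPairs := List.mem_of_find?_eq_some hf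
    have hpe : PySem.Chars.endswith l p.1 = true :=
      List.find?_some (p := fun q : List Char × String => PySem.Chars.endswith l q.1) hf
    have hsuf : p.1 <:+ l := (PySem.Chars.endswith_iff l p.1).mp hpe
    have hklen : p.1.length ≤ l.length := hsuf.length_le
    have hdropeq : l.drop (l.length - p.1.length) = p.1 := by
      have hds : l.drop (l.length - p.1.length) <:+ l := List.drop_suffix _ _
      have hdl : (l.drop (l.length - p.1.length)).length = p.1.length := by simp; omega
      exact List.IsSuffix.eq_of_length
        (List.suffix_of_suffix_length_le hds hsuf (by omega)) hdl
    rw [ebc_probe_found s l l.length ebcLengths p.1.length p.2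
        (ebc_fact_len p hp) hklen (by rw [hdropeq]; exact ebc_fact_get p hp)
        (fun k hk hne hkn => ?_)]
    · simp only [Option.map_some]
      rw [PySem.List.slice_to_neg_natCast s p.1.length (ebc_fact_pos p hp), hlen]
    · cases hg : PySem.Dict.get? ebcSuffixMap (l.drop (l.length - k)) with
      | none => rfl
      | some a =>
        obtain ⟨hmem, hsuf', hlendrop⟩ := ebc_probe_pair rfl hkn hg
        have heq := ebc_unique hmem hp hsuf' hsuf
        exact absurd (hlendrop.symm.trans (congrArg (fun x => x.1.length) heq)) hne

-- ===== VERDICT (by name: the statement is the Claim_ definition above) =====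
theorem extract_browser_clause_spec : Claim_equal_extract_browser_clause := by
  intro text _dom
  exact ebc_main (PySem.Chars.strip text.toList)
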